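-- pv_equiv track=rewrite | github.com/lingpy/lingpy | lingpy/algorithm/cluster_util.py | order_cluster
-- ===== SOURCE A (Python) =====
-- def order_cluster(clr):
--     """Order a cluster into the form of a valid cluster.
--
--     Parameters
--     ----------
--     clr : list
--         A list with clusters assigned by given each element a specific clusuter
--         ID.
--
--     Returns
--     -------
--     valid_cluster : list
--         A list in which the IDs start from zero and increase consecutively with
--         each new cluster introduced.
--
--     Seealso
--     -------
--     valid_cluster
--     generate_all_clusters
--     generate_random_cluster
--     mutate_cluster
--     """
--     current = 0
--     dct = {}
--     out = []
--     for element in clr: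
--         pendant = dct.get(element, current)
--         out += [pendant]
--         if element not in dct:
--             dct[element] = current
--             current += 1
--     return out
-- ===== SOURCE B (Python) =====
-- def order_cluster(clr):
--     # Each element's new ID is the number of distinct cluster IDs that appear
--     # strictly before its first occurrence in the list.
--     return [len(set(clr[:clr.index(x)])) for x in clr]
-- ===== Notes on version B (the rewrite author's own statement) =====
-- stated objective: alternative
-- what changed: Instead of a fused loop maintaining a counter and a dict, B computes each element's new ID independently as the count of distinct values in the prefix before that element's first occurrence (list.index + set cardinality), with no relabeling table at all.
import Mathlib
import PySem

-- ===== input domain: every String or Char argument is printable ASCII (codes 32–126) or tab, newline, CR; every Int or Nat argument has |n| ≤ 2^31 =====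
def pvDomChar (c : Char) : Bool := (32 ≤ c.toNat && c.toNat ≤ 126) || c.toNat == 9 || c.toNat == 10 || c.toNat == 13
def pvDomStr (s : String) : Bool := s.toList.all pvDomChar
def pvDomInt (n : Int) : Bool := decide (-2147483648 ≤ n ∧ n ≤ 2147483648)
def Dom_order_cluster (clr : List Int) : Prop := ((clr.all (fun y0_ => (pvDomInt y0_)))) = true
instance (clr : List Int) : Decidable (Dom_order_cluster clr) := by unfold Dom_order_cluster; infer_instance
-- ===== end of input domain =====

-- B drops A's relabeling table entirely: each element's new ID is computed independently as the
-- number of distinct values in the prefix before its first occurrence. Objective: alternative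
-- (different algorithm of quadratic cost; A is linear).

-- ===== PORT A =====
def order_cluster (clr : List Int) : List Int :=
  (clr.foldl
    (fun (st : Int × PySem.Dict Int Int × List Int) element =>
      let pendant := st.2.1.getD element st.1
      let out := st.2.2 ++ [pendant]
      if st.2.1.contains element then (st.1, st.2.1, out)
      else (st.1 + 1, st.2.1.insert element st.1, out))
    (0, PySem.Dict.empty, [])).2.2

-- ===== PORT B =====
-- [len(set(clr[:clr.index(x)])) for x in clr]; clr.index never raises since x is drawn from clr
def order_cluster_alt (clr : List Int) : List Int :=
  clr.map (fun x =>
    ((PySem.Set.ofList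
        (PySem.List.slice clr none
          (some (((PySem.List.index? clr x).getD 0 : Nat) : Int)))).length : Int))

-- ===== PRECONDITION & SPEC =====
def Spec_order_cluster (clr : List Int) (out : List Int) : Prop := out = order_cluster_alt clr
instance (clr : List Int) (out : List Int) : Decidable (Spec_order_cluster clr out) := by unfold Spec_order_cluster; infer_instance

-- ===== CLAIM (what is proved, stated in full; the proofs are below) =====
def Claim_equal_order_cluster : Prop := ∀ (clr : List Int), Dom_order_cluster clr → Spec_order_cluster clr (order_cluster clr)

-- ===== LEMMAS AND PROOFS =====

-- the dict that maps each element of u to its (s-shifted) first-appearance index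
def dictOfS (u : List Int) (s : Int) : PySem.Dict Int Int :=
  PySem.Dict.mk ((PySem.List.enumerate u s).map (fun p => (p.2, p.1)))

-- common recursive description of the relabelling, parametrised by the clusters seen so far
def specRel (u : List Int) : List Int → List Int
  | [] => []
  | x :: xs =>
      if x ∈ u then (((PySem.List.index? u x).getD 0 : Nat) : Int) :: specRel u xs
      else ((u.length : Int)) :: specRel (u ++ [x]) xs

theorem dictOfS_get? (u : List Int) (s : Int) (x : Int) :
    (dictOfS u s).get? x = (PySem.List.index? u x).map (fun k => s + (k : Int)) := by
  induction u generalizing s with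
  | nil =>
    simp [dictOfS, PySem.List.enumerate_nil, PySem.Dict.get?, PySem.List.index?_eq_idxOf?]
  | cons a u ih =>
    have hd : dictOfS (a :: u) s
        = PySem.Dict.mk ((a, s) :: (PySem.List.enumerate u (s + 1)).map (fun p => (p.2, p.1))) := by
      simp [dictOfS, PySem.List.enumerate_cons]
    rw [hd, PySem.Dict.get?_mk_cons]
    by_cases hax : a = x
    · subst hax
      rw [if_pos (by simp), PySem.List.index?_cons_self]
      simp
    · rw [if_neg (by simp [hax])]
      have hrec : PySem.Dict.mk ((PySem.List.enumerate u (s + 1)).map (fun p => (p.2, p.1)))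
          = dictOfS u (s + 1) := rfl
      rw [hrec, ih (s + 1), PySem.List.index?_cons_of_ne u hax]
      cases PySem.List.index? u x with
      | none => rfl
      | some k => exact congrArg some (by push_cast; ring)

theorem dictOfS_contains (u : List Int) (s : Int) (x : Int) :
    (dictOfS u s).contains x = decide (x ∈ u) := by
  rw [PySem.Dict.contains_eq_isSome_get?, dictOfS_get?]
  rcases h : PySem.List.index? u x with _ | k
  · have hm : x ∉ u := (PySem.List.index?_eq_none_iff u x).mp h
    simp [hm]
  · have hm : x ∈ u := (PySem.List.index?_isSome_iff u x).mp (by rw [h]; rfl)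
    simp [hm]

theorem dictOfS_insert (u : List Int) (x : Int) (hx : x ∉ u) :
    (dictOfS u 0).insert x (u.length : Int) = dictOfS (u ++ [x]) 0 := by
  have hc : (dictOfS u 0).contains x = false := by
    rw [dictOfS_contains]; simp [hx]
  apply PySem.Dict.ext
  rw [PySem.Dict.items_insert_of_not_contains (dictOfS u 0) (u.length : Int) hc]
  simp [dictOfS, PySem.List.enumerate_append, PySem.List.enumerate_cons,
    PySem.List.enumerate_nil]

theorem nodup_append_singleton (u : List Int) (x : Int) (hu : u.Nodup) (hx : x ∉ u) :
    (u ++ [x]).Nodup := by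
  simp [List.nodup_append, hu]
  exact fun a ha h => hx (h ▸ ha)

-- A's loop, from the state corresponding to the seen-cluster list u, produces specRel u
theorem portA_loop (rest : List Int) (u out : List Int) (hu : u.Nodup) :
    (rest.foldl
      (fun (st : Int × PySem.Dict Int Int × List Int) element =>
        let pendant := st.2.1.getD element st.1
        let out := st.2.2 ++ [pendant]
        if st.2.1.contains element then (st.1, st.2.1, out)
        else (st.1 + 1, st.2.1.insert element st.1, out))
      ((u.length : Int), dictOfS u 0, out)).2.2 = out ++ specRel u rest := by
  induction rest generalizing u out with
  | nil => simp [specRel]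
  | cons x xs ih =>
    simp only [List.foldl_cons]
    by_cases hx : x ∈ u
    · have hc : (dictOfS u 0).contains x = true := by
        rw [dictOfS_contains]; simp [hx]
      obtain ⟨k, hk⟩ :=
        Option.isSome_iff_exists.mp ((PySem.List.index?_isSome_iff u x).mpr hx)
      have hg : (dictOfS u 0).getD x (u.length : Int) = ((k : Nat) : Int) := by
        rw [PySem.Dict.getD_eq_get?_getD, dictOfS_get?, hk]; simp
      simp only [hc, if_true, hg]
      rw [ih u _ hu]
      rw [PySem.List.index?_eq_idxOf?] at hk
      simp [specRel, hx, hk]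
    · have hc : (dictOfS u 0).contains x = false := by
        rw [dictOfS_contains]; simp [hx]
      have hg : (dictOfS u 0).getD x (u.length : Int) = (u.length : Int) := by
        rw [PySem.Dict.getD_eq_get?_getD, dictOfS_get?,
          (PySem.List.index?_eq_none_iff u x).mpr hx]; rfl
      simp only [hc, if_false, hg, Bool.false_eq_true]
      rw [dictOfS_insert u x hx]
      have hl : ((u.length : Int) + 1) = (((u ++ [x]).length : Nat) : Int) := by
        simp
      rw [hl, ih (u ++ [x]) _ (nodup_append_singleton u x hu hx)]
      simp [specRel, hx]

-- Set.update only appends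
theorem update_exists_suffix (l u : List Int) :
    ∃ t, PySem.Set.update u l = u ++ t := by
  induction l generalizing u with
  | nil => exact ⟨[], by simp [PySem.Set.update]⟩
  | cons x xs ih =>
    have h1 : PySem.Set.update u (x :: xs) = PySem.Set.update (PySem.Set.add u x) xs := rfl
    by_cases hx : x ∈ u
    · have ha : PySem.Set.add u x = u := by simp [PySem.Set.add, PySem.Set.contains, hx]
      rw [h1, ha]; exact ih u
    · have ha : PySem.Set.add u x = u ++ [x] := by simp [PySem.Set.add, PySem.Set.contains, hx]
      obtain ⟨t, ht⟩ := ih (u ++ [x])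
      exact ⟨x :: t, by rw [h1, ha, ht]; simp⟩

-- the index-in-dedup reading of the relabelling
theorem dedup_index_loop (rest u : List Int) (hu : u.Nodup) :
    rest.map (fun x => (((PySem.List.index? (PySem.Set.update u rest) x).getD 0 : Nat) : Int))
      = specRel u rest := by
  induction rest generalizing u with
  | nil => rfl
  | cons x xs ih =>
    have h1 : PySem.Set.update u (x :: xs) = PySem.Set.update (PySem.Set.add u x) xs := rfl
    by_cases hx : x ∈ u
    · have ha : PySem.Set.add u x = u := by simp [PySem.Set.add, PySem.Set.contains, hx]
      obtain ⟨t, ht⟩ := update_exists_suffix xs u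
      have hidx : PySem.List.index? (PySem.Set.update u xs) x = PySem.List.index? u x := by
        rw [ht]; exact PySem.List.index?_append_of_mem t hx
      simp only [List.map_cons, h1, ha]
      rw [ih u hu]
      rw [PySem.List.index?_eq_idxOf?, PySem.List.index?_eq_idxOf?] at hidx
      simp [specRel, hx, hidx]
    · have ha : PySem.Set.add u x = u ++ [x] := by simp [PySem.Set.add, PySem.Set.contains, hx]
      obtain ⟨t, ht⟩ := update_exists_suffix xs (u ++ [x])
      have hidx : PySem.List.index? (PySem.Set.update (u ++ [x]) xs) x = some u.length := by
        rw [ht, PySem.List.index?_append_of_mem t (by simp),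
          PySem.List.index?_append_singleton_self u x hx]
      simp only [List.map_cons, h1, ha]
      rw [ih (u ++ [x]) (nodup_append_singleton u x hu hx)]
      rw [PySem.List.index?_eq_idxOf?] at hidx
      simp [specRel, hx, hidx]

-- B's per-element value: #distinct before the first occurrence of x = index of x in the ordered dedup
theorem prefix_card_eq_dedup_index (clr : List Int) (x : Int) (hx : x ∈ clr) :
    ((PySem.Set.ofList (clr.take ((PySem.List.index? clr x).getD 0))).length : Int)
      = (((PySem.List.index? (PySem.Set.ofList clr) x).getD 0 : Nat) : Int) := by
  obtain ⟨j, hj⟩ :=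
    Option.isSome_iff_exists.mp ((PySem.List.index?_isSome_iff clr x).mpr hx)
  obtain ⟨pre, suf, hdec, hlen, hxpre⟩ := (PySem.List.index?_eq_some_iff clr x j).mp hj
  have hxpre' : x ∉ PySem.Set.ofList pre := fun h =>
    hxpre ((PySem.Set.mem_ofList pre x).mp h)
  have htake : clr.take j = pre := by
    rw [hdec, ← hlen, List.take_left]
  have hadd : PySem.Set.add (PySem.Set.ofList pre) x = PySem.Set.ofList pre ++ [x] := by
    simp [PySem.Set.add, PySem.Set.contains]
    intro h; exact absurd h hxpre
  have hofl : PySem.Set.ofList clr = PySem.Set.update (PySem.Set.ofList pre ++ [x]) suf := by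
    rw [hdec, PySem.Set.ofList_eq_foldl, List.foldl_append]
    rw [show (x :: suf).foldl PySem.Set.add (pre.foldl PySem.Set.add [])
        = PySem.Set.update (PySem.Set.add (PySem.Set.ofList pre) x) suf from by
      simp [PySem.Set.update, PySem.Set.ofList_eq_foldl]]
    rw [hadd]
  obtain ⟨t, ht⟩ := update_exists_suffix suf (PySem.Set.ofList pre ++ [x])
  have hidx : PySem.List.index? (PySem.Set.ofList clr) x
      = some (PySem.Set.ofList pre).length := by
    rw [hofl, ht, PySem.List.index?_append_of_mem t (by simp),
      PySem.List.index?_append_singleton_self _ x hxpre']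
  simp only [hj, hidx, Option.getD_some, htake]

-- ===== VERDICT (by name: the statement is the Claim_ definition above) =====
theorem order_cluster_spec : Claim_equal_order_cluster := by
  intro clr _
  unfold Spec_order_cluster
  have hA : order_cluster clr = specRel [] clr := by
    unfold order_cluster
    rw [show ((0 : Int), (PySem.Dict.empty : PySem.Dict Int Int), ([] : List Int))
        = ((([] : List Int).length : Int), dictOfS [] 0, ([] : List Int)) from by
      simp [dictOfS, PySem.List.enumerate_nil, PySem.Dict.empty]]
    rw [portA_loop clr [] [] List.nodup_nil]
    simp
  have hB : order_cluster_alt clr = specRel [] clr := by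
    unfold order_cluster_alt
    have hmap : ∀ x ∈ clr,
        ((PySem.Set.ofList
            (PySem.List.slice clr none
              (some (((PySem.List.index? clr x).getD 0 : Nat) : Int)))).length : Int)
          = (((PySem.List.index? (PySem.Set.update [] clr) x).getD 0 : Nat) : Int) := by
      intro x hx
      rw [PySem.List.slice_to_natCast, prefix_card_eq_dedup_index clr x hx]
      rw [show PySem.Set.update ([] : List Int) clr = PySem.Set.ofList clr from by
        simp [PySem.Set.update, PySem.Set.ofList_eq_foldl]]
    rw [List.map_congr_left hmap, dedup_index_loop clr [] List.nodup_nil]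
  rw [hA, hB]
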